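-- pv_equiv track=rewrite | github.com/4chuck/your_buddy | backend/agent.py | _is_auth_error_text
-- ===== SOURCE A (Python) =====
-- def _is_auth_error_text(message: str) -> bool:
--     text = str(message or "").lower()
--     return any(
--         marker in text
--         for marker in (
--             "unauthorized",
--             "forbidden",
--             "api key",
--             "permission denied",
--             "authentication",
--             "invalid argument",
--             "401",
--             "403",
--         )
--     )
-- ===== SOURCE B (Python) =====
-- def _is_auth_error_text(message: str) -> bool:
--     text = str(message or "").lower()
--     markers = (
--         "unauthorized",
--         "forbidden",
--         "api key",
--         "permission denied",
--         "authentication",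
--         "invalid argument",
--         "401",
--         "403",
--     )
--     # single left-to-right scan: at each position check whether any marker starts there
--     for i in range(len(text)):
--         for m in markers:
--             if text.startswith(m, i):
--                 return True
--     return False
-- ===== Notes on version B (the rewrite author's own statement) =====
-- stated objective: alternative
-- what changed: Replaces the eight independent whole-string substring membership scans with one left-to-right scan over positions that checks at each position whether any marker starts there.
import Mathlib
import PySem

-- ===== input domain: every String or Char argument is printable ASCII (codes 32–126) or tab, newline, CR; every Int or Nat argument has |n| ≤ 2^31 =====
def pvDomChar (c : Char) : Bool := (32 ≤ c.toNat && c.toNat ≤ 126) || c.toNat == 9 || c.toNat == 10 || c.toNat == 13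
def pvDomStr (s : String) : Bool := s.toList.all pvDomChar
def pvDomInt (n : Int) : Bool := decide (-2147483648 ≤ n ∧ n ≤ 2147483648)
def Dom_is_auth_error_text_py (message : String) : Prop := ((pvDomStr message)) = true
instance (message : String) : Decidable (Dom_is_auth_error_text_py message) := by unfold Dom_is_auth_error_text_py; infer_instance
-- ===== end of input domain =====

-- B replaces A's eight independent whole-string substring scans with a single
-- left-to-right scan over positions checking each marker as a prefix there (alternative, same cost).

-- ===== PORT A =====
def is_auth_error_text_py (message : String) : Bool :=
  let text := PySem.Str.lower (if message = "" then "" else message)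
  ["unauthorized", "forbidden", "api key", "permission denied",
   "authentication", "invalid argument", "401", "403"].any
    (fun marker => PySem.Str.isIn marker text)

-- ===== PORT B =====
def pvMarkers : List (List Char) :=
  ["unauthorized", "forbidden", "api key", "permission denied",
   "authentication", "invalid argument", "401", "403"].map String.toList

-- for i in range(len(text)): for m in markers: if text.startswith(m, i): return True
def pvScan (ms : List (List Char)) : List Char → Bool
  | [] => false
  | c :: rest =>
      if ms.any (fun m => PySem.Chars.startswith (c :: rest) m) then true
      else pvScan ms rest

def is_auth_error_text_py_alt (message : String) : Bool :=
  let text := PySem.Str.lower (if message = "" then "" else message)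
  pvScan pvMarkers text.toList

-- ===== PRECONDITION & SPEC =====
def Spec_is_auth_error_text_py (message : String) (out : Bool) : Prop := out = is_auth_error_text_py_alt message
instance (message : String) (out : Bool) : Decidable (Spec_is_auth_error_text_py message out) := by unfold Spec_is_auth_error_text_py; infer_instance

-- ===== CLAIM (what is proved, stated in full; the proofs are below) =====
def Claim_equal_is_auth_error_text_py : Prop := ∀ (message : String), Dom_is_auth_error_text_py message → Spec_is_auth_error_text_py message (is_auth_error_text_py message)

-- ===== LEMMAS AND PROOFS =====

lemma pv_isIn_cons (m : List Char) (c : Char) (rest : List Char) :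
    PySem.Chars.isIn m (c :: rest)
      = (PySem.Chars.startswith (c :: rest) m || PySem.Chars.isIn m rest) := by
  rw [Bool.eq_iff_iff]
  simp [PySem.Chars.isIn_iff_infix, PySem.Chars.startswith_iff, List.infix_cons_iff]

lemma pvScan_eq_any_isIn (ms : List (List Char)) (hne : ∀ m ∈ ms, m ≠ []) :
    ∀ l : List Char, pvScan ms l = ms.any (fun m => PySem.Chars.isIn m l) := by
  intro l
  induction l with
  | nil =>
      simp only [pvScan]
      symm
      simp only [List.any_eq_false]
      intro m hm
      rw [Bool.not_eq_true, PySem.Chars.isIn_eq_false_iff]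
      intro h
      exact hne m hm (List.eq_nil_of_infix_nil h)
  | cons c rest ih =>
      simp only [pvScan, ih]
      have hrw : (ms.any fun m => PySem.Chars.isIn m (c :: rest))
          = ((ms.any fun m => PySem.Chars.startswith (c :: rest) m)
              || ms.any fun m => PySem.Chars.isIn m rest) := by
        rw [Bool.eq_iff_iff]
        simp only [List.any_eq_true, Bool.or_eq_true, pv_isIn_cons]
        aesop
      rw [hrw]
      cases ms.any fun m => PySem.Chars.startswith (c :: rest) m <;> simp

-- ===== VERDICT (by name: the statement is the Claim_ definition above) =====
theorem is_auth_error_text_py_spec : Claim_equal_is_auth_error_text_py := by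
  intro message _
  unfold Spec_is_auth_error_text_py is_auth_error_text_py is_auth_error_text_py_alt
  rw [pvScan_eq_any_isIn pvMarkers (by decide)]
  simp [pvMarkers, PySem.Str.isIn]
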